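-- pv_equiv track=rewrite | github.com/tate11/dha_modifier | dha_medic_modifier/service/vi_amount_to_text.py | _convert_nn_vi
-- ===== SOURCE A (Python) =====
-- to_19_vi = ('không', 'một', 'hai', 'ba', 'bốn', 'năm', 'sáu',
--             'bảy', 'tám', 'chín', 'mười', 'mười một', 'mười hai', 'mười ba',
--             'mười bốn', 'mười lăm', 'mười sáu', 'mười bảy', 'mười tám', 'mười chín')
--
-- tens_vi = ('hai mươi', 'ba mươi', 'bốn mươi', 'năm mươi', 'sáu mươi', 'bảy mươi', 'tám mươi', 'chín mươi')
--
-- def _convert_nn_vi(val):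
--     """ convert a value < 100 to French
--     """
--     if val < 20:
--         return to_19_vi[val]
--     for (dcap, dval) in ((k, 20 + (10 * v)) for (v, k) in enumerate(tens_vi)):
--         if dval + 10 > val:
--             if val % 10:
--                 return dcap + '-' + to_19_vi[val % 10]
--             return dcap
-- ===== SOURCE B (Python) =====
-- to_19_vi = ('không', 'một', 'hai', 'ba', 'bốn', 'năm', 'sáu',
--             'bảy', 'tám', 'chín', 'mười', 'mười một', 'mười hai', 'mười ba',
--             'mười bốn', 'mười lăm', 'mười sáu', 'mười bảy', 'mười tám', 'mười chín')
--
-- tens_vi = ('hai mươi', 'ba mươi', 'bốn mươi', 'năm mươi', 'sáu mươi', 'bảy mươi', 'tám mươi', 'chín mươi')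
--
-- def _convert_nn_vi(val):
--     """ convert a value < 100 to Vietnamese text """
--     if val < 20:
--         return to_19_vi[val]
--     d, m = divmod(val, 10)
--     dcap = tens_vi[d - 2]
--     return dcap + '-' + to_19_vi[m] if m else dcap
-- ===== Notes on version B (the rewrite author's own statement) =====
-- stated objective: simpler
-- what changed: Replaces A's generator-driven linear scan over the tens table with direct arithmetic indexing: divmod(val, 10) picks the tens word and the unit word in closed form.
-- outside the precondition, e.g. on _convert_nn_vi(100): A returns None, B raises IndexError; on _convert_nn_vi(-21): A raises IndexError, B raises IndexError
import Mathlib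
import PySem

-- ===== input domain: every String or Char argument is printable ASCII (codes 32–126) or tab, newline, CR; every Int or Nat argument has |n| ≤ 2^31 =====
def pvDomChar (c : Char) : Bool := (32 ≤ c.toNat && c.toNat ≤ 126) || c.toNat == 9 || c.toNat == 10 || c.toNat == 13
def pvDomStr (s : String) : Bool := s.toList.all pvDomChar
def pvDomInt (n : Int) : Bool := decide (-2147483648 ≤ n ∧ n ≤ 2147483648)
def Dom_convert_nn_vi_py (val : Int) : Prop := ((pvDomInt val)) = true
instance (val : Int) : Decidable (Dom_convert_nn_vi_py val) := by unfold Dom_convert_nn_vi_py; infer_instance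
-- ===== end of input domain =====

-- B replaces A's linear scan over the tens table with direct arithmetic indexing via divmod (objective: simpler).

def to19vi : List String := ["không", "một", "hai", "ba", "bốn", "năm", "sáu",
  "bảy", "tám", "chín", "mười", "mười một", "mười hai", "mười ba",
  "mười bốn", "mười lăm", "mười sáu", "mười bảy", "mười tám", "mười chín"]

def tensVi : List String := ["hai mươi", "ba mươi", "bốn mươi", "năm mươi",
  "sáu mươi", "bảy mươi", "tám mươi", "chín mươi"]

-- ===== PORT A =====
-- the for-loop over the generator ((k, 20 + 10*v) for (v,k) in enumerate(tens_vi));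
-- returns none where the Python falls through returning None (excluded by Pre_)
def convertLoopA (val : Int) : List (String × Int) → Option String
  | [] => none
  | (dcap, dval) :: rest =>
    if dval + 10 > val then
      if PySem.Int.mod val 10 ≠ 0 then
        some (dcap ++ "-" ++ ((PySem.List.pyGet? to19vi (PySem.Int.mod val 10)).getD ""))
      else some dcap
    else convertLoopA val rest

def convert_nn_vi_py (val : Int) : String :=
  if val < 20 then (PySem.List.pyGet? to19vi val).getD ""   -- .getD "" only where Pre_ excludes the IndexError
  else (convertLoopA val (tensVi.zipIdx.map fun kv => (kv.1, 20 + 10 * (kv.2 : Int)))).getD ""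

-- ===== PORT B =====
def convert_nn_vi_py_alt (val : Int) : String :=
  if val < 20 then (PySem.List.pyGet? to19vi val).getD ""
  else
    let d := PySem.Int.floordiv val 10
    let m := PySem.Int.mod val 10
    let dcap := (PySem.List.pyGet? tensVi (d - 2)).getD ""
    if m ≠ 0 then dcap ++ "-" ++ ((PySem.List.pyGet? to19vi m).getD "") else dcap

-- ===== PRECONDITION & SPEC =====
-- Pre_ excludes inputs where A raises IndexError (values too negative for Python's
-- negative indexing into the 20-entry table) and inputs of at least one hundred, where A
-- falls off the loop and returns None, which is not a string; B raises IndexError on both regions.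
def Pre_convert_nn_vi_py (val : Int) : Prop := -20 ≤ val ∧ val ≤ 99
instance (val : Int) : Decidable (Pre_convert_nn_vi_py val) := by unfold Pre_convert_nn_vi_py; infer_instance
def pvWitness_convert_nn_vi_py : Int := (42)

def Spec_convert_nn_vi_py (val : Int) (out : String) : Prop := out = convert_nn_vi_py_alt val
instance (val : Int) (out : String) : Decidable (Spec_convert_nn_vi_py val out) := by unfold Spec_convert_nn_vi_py; infer_instance

-- ===== CLAIM (what is proved, stated in full; the proofs are below) =====
def Claim_equal_convert_nn_vi_py : Prop := ∀ (val : Int), Dom_convert_nn_vi_py val → Pre_convert_nn_vi_py val → Spec_convert_nn_vi_py val (convert_nn_vi_py val)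

-- ===== LEMMAS AND PROOFS =====

-- ===== VERDICT (by name: the statement is the Claim_ definition above) =====
theorem convert_nn_vi_py_spec : Claim_equal_convert_nn_vi_py := by
  intro val _ hpre
  unfold Pre_convert_nn_vi_py at hpre
  unfold Spec_convert_nn_vi_py
  obtain ⟨h1, h2⟩ := hpre
  interval_cases val <;> decide
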